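-- pv_equiv track=rewrite | github.com/ryu577/optimizn | optimizn/ab_split/opt_split.py | arr_to_map
-- ===== SOURCE A (Python) =====
-- def arr_to_map(arr):
--     res = {}
--     ix = 0
--     for i in arr:
--         if i not in res:
--             res[i] = ix
--             ix += 1
--     return res
-- ===== SOURCE B (Python) =====
-- def arr_to_map(arr):
--     # Backward pass: overwrite so the surviving value is each element's FIRST index.
--     n = len(arr)
--     first = {}
--     for j, v in enumerate(reversed(arr)):
--         first[v] = n - 1 - j
--     # Sort the distinct elements by first-occurrence index, then assign ranks.
--     order = sorted(first, key=first.get)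
--     return {v: rank for rank, v in enumerate(order)}
-- ===== Notes on version B (the rewrite author's own statement) =====
-- stated objective: alternative
-- what changed: Instead of A's single forward pass interleaving a membership guard with a manual counter, B makes a backward overwrite pass to record each element's first-occurrence index, sorts the distinct elements by that index, and assigns ranks by enumerating the sorted list.
import Mathlib
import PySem

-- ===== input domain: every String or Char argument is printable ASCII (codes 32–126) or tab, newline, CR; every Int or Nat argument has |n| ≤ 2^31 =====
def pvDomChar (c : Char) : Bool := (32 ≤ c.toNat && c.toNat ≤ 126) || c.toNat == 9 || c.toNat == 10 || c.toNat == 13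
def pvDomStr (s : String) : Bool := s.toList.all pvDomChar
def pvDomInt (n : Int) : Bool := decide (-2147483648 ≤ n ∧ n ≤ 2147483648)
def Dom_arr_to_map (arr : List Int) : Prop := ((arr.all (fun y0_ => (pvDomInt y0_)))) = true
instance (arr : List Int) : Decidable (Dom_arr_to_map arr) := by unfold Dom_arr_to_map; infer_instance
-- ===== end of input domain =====

-- B replaces A's single forward pass (membership guard + manual counter) by three stages:
-- a backward overwrite pass recording each element's first index, a sort of the distinct
-- elements by that index, and a rank-assigning enumeration (alternative decomposition).

-- ===== PORT A =====
-- the loop body: 'if i not in res: res[i] = ix; ix += 1'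
def arr_to_map_step (st : PySem.Dict Int Int × Int) (i : Int) : PySem.Dict Int Int × Int :=
  if !(st.1.contains i) then (st.1.insert i st.2, st.2 + 1) else st

def arr_to_map (arr : List Int) : List (Int × Int) :=
  (arr.foldl arr_to_map_step ((PySem.Dict.empty : PySem.Dict Int Int), 0)).1.items

-- ===== PORT B =====
-- 'for j, v in enumerate(reversed(arr)): first[v] = n - 1 - j';
-- 'sorted(first, key=first.get)' — every key of 'first' is present, so first.get v is its
-- int value; ported as (first.get? v).getD 0; '{v: rank for rank, v in enumerate(order)}'.
def arr_to_map_alt (arr : List Int) : List (Int × Int) :=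
  let n : Int := arr.length
  let first := (PySem.List.enumerate arr.reverse 0).foldl
      (fun d p => d.insert p.2 (n - 1 - p.1)) (PySem.Dict.empty : PySem.Dict Int Int)
  let order := PySem.List.sorted first.keys (fun v => (first.get? v).getD 0) false
  (PySem.List.enumerate order 0).map (fun p => (p.2, p.1))

-- ===== PRECONDITION & SPEC =====
def Spec_arr_to_map (arr : List Int) (out : List (Int × Int)) : Prop := out = arr_to_map_alt arr
instance (arr : List Int) (out : List (Int × Int)) : Decidable (Spec_arr_to_map arr out) := by unfold Spec_arr_to_map; infer_instance

-- ===== CLAIM (what is proved, stated in full; the proofs are below) =====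
def Claim_equal_arr_to_map : Prop := ∀ (arr : List Int), Dom_arr_to_map arr → Spec_arr_to_map arr (arr_to_map arr)

-- ===== LEMMAS AND PROOFS =====

-- A's loop, started at any dict d whose counter equals d.size, appends exactly the
-- fresh distinct elements of arr, paired with consecutive ranks starting at d.size.
lemma arr_to_map_fold (arr : List Int) : ∀ (d : PySem.Dict Int Int),
    (arr.foldl arr_to_map_step (d, (d.size : Int))).1.items
      = d.items ++ (PySem.List.enumerate
          ((PySem.Set.ofList arr).filter (fun y => !(d.contains y))) (d.size : Int)).map
          (fun p => (p.2, p.1)) := by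
  induction arr with
  | nil => intro d; simp [PySem.Set.ofList_nil]
  | cons x rest ih =>
    intro d
    by_cases hx : d.contains x = true
    · have hstep : arr_to_map_step (d, (d.size : Int)) x = (d, (d.size : Int)) := by
        simp [arr_to_map_step, hx]
      have hfilter : ((PySem.Set.ofList (x :: rest)).filter (fun y => !(d.contains y)))
          = ((PySem.Set.ofList rest).filter (fun y => !(d.contains y))) := by
        rw [PySem.Set.ofList_cons]
        simp only [List.filter_cons, hx, Bool.not_true, PySem.Set.discard, List.filter_filter]
        refine (if_neg (by simp)).trans (List.filter_congr ?_)
        intro y _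
        by_cases hy : d.contains y = true
        · simp [hy]
        · have : y ≠ x := by intro h; rw [h] at hy; exact hy hx
          simp [hy, this]
      rw [List.foldl_cons, hstep, ih d, hfilter]
    · have hx' : d.contains x = false := by simpa using hx
      have hstep : arr_to_map_step (d, (d.size : Int)) x
          = (d.insert x (d.size : Int), (d.size : Int) + 1) := by
        simp [arr_to_map_step, hx']
      set d' := d.insert x (d.size : Int) with hd'
      have hsize : (d'.size : Int) = (d.size : Int) + 1 := by
        rw [hd', PySem.Dict.size_insert, hx']
        push_cast; ring
      have hitems : d'.items = d.items ++ [(x, (d.size : Int))] :=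
        PySem.Dict.items_insert_of_not_contains _ _ hx'
      have hfilter : ((PySem.Set.ofList rest).filter (fun y => !(d'.contains y)))
          = ((PySem.Set.ofList rest).filter (fun y => y ≠ x)).filter
              (fun y => !(d.contains y)) := by
        simp only [List.filter_filter]
        refine List.filter_congr ?_
        intro y _
        rw [hd', PySem.Dict.contains_insert]
        by_cases hyx : y = x
        · simp [hyx]
        · simp [hyx, Bool.and_comm]
      have := ih d'
      rw [hsize, hfilter] at this
      rw [List.foldl_cons, hstep, this, hitems, PySem.Set.ofList_cons]
      simp only [List.filter_cons, hx', Bool.not_false, PySem.Set.discard,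
        List.append_assoc, List.singleton_append]
      rw [List.filter_congr (fun (y : Int) (_ : y ∈ PySem.Set.ofList rest) => by
        show (decide (y ≠ x)) = (!(y == x)); by_cases h : y = x <;> simp [h])]
      simp [PySem.List.enumerate_cons]

-- the pair sequence B's backward loop inserts is the reverse of [(arr[i], i)]
lemma bwd_pairs_eq (arr : List Int) :
    (PySem.List.enumerate arr.reverse 0).map (fun p => (p.2, ((arr.length : Int) - 1 - p.1)))
      = ((PySem.List.enumerate arr 0).map (fun p => (p.2, p.1))).reverse := by
  apply List.ext_getElem
  · simp [PySem.List.length_enumerate]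
  · intro k h1 h2
    have hk : k < arr.length := by simpa [PySem.List.length_enumerate] using h1
    simp only [List.getElem_map, List.getElem_reverse, PySem.List.getElem_enumerate,
      List.length_map, PySem.List.length_enumerate]
    congr 1
    omega

-- a fold of plain inserts looks up to the LAST inserted value of the key
lemma get?_foldl_insert (ps : List (Int × Int)) : ∀ (d : PySem.Dict Int Int) (k : Int),
    (ps.foldl (fun d p => d.insert p.1 p.2) d).get? k
      = ((ps.reverse.find? (fun p => p.1 == k)).map (·.2)).or (d.get? k) := by
  induction ps with
  | nil => intro d k; simp
  | cons p rest ih =>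
    intro d k
    rw [List.foldl_cons, ih, List.reverse_cons, List.find?_append]
    cases hfind : rest.reverse.find? (fun p => p.1 == k) with
    | some q => simp
    | none =>
      simp only [Option.map_none, Option.none_or, List.find?_singleton]
      by_cases hpk : p.1 = k
      · subst hpk; simp [PySem.Dict.get?_insert_self]
      · rw [PySem.Dict.get?_insert_of_ne _ _ (Ne.symm hpk)]
        simp [hpk]

-- the first pair with key k in [(arr[i], i)] carries k's first-occurrence index
lemma find?_enum (arr : List Int) (k : Int) : ∀ s : Int,
    ((PySem.List.enumerate arr s).map (fun p => (p.2, p.1))).find? (fun p => p.1 == k)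
      = (PySem.List.index? arr k).map (fun (i : Nat) => (k, s + (i : Int))) := by
  induction arr with
  | nil => intro s; simp [PySem.List.enumerate_nil, PySem.List.index?]
  | cons x rest ih =>
    intro s
    rw [PySem.List.enumerate_cons, List.map_cons, List.find?_cons]
    by_cases hxk : x = k
    · subst hxk
      rw [PySem.List.index?_cons_self]
      simp
    · have hcond : (((x, s) : Int × Int).1 == k) = false := by simpa using hxk
      simp only [hcond]
      rw [PySem.List.index?_cons_of_ne rest hxk, ih (s + 1), Option.map_map]
      congr 1
      funext i
      simp only [Function.comp_apply, Prod.mk.injEq, true_and]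
      push_cast
      ring

-- distinct elements in first-occurrence order are strictly increasing in first index
lemma ofList_pairwise_fidx : ∀ (l : List Int),
    (PySem.Set.ofList l).Pairwise
      (fun a b => (PySem.List.index? l a).getD 0 < (PySem.List.index? l b).getD 0) := by
  intro l
  induction l with
  | nil => simp [PySem.Set.ofList_nil]
  | cons x rest ih =>
    rw [PySem.Set.ofList_cons]
    refine List.Pairwise.cons ?_ ?_
    · intro b hb
      obtain ⟨hbs, hbx⟩ : b ∈ PySem.Set.ofList rest ∧ b ≠ x := by
        simpa using (PySem.Set.mem_discard (PySem.Set.ofList rest) x b).mp hb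
      have hbr : b ∈ rest := (PySem.Set.mem_ofList rest b).mp hbs
      obtain ⟨j, hj⟩ : ∃ j, PySem.List.index? rest b = some j :=
        Option.isSome_iff_exists.mp ((PySem.List.index?_isSome_iff rest b).mpr hbr)
      rw [PySem.List.index?_cons_self, PySem.List.index?_cons_of_ne rest (Ne.symm hbx), hj]
      simp
    · have hdis : PySem.Set.discard (PySem.Set.ofList rest) x
          = (PySem.Set.ofList rest).filter (fun y => !(y == x)) := by
        simp [PySem.Set.discard]
      rw [hdis]
      refine List.Pairwise.imp_of_mem ?_ (ih.filter _)
      intro a b ha hb hab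
      have hax : a ≠ x := by simpa using (List.mem_filter.mp ha).2
      have hbx : b ≠ x := by simpa using (List.mem_filter.mp hb).2
      have har : a ∈ rest := (PySem.Set.mem_ofList rest a).mp (List.mem_filter.mp ha).1
      have hbr : b ∈ rest := (PySem.Set.mem_ofList rest b).mp (List.mem_filter.mp hb).1
      obtain ⟨i, hi⟩ : ∃ i, PySem.List.index? rest a = some i :=
        Option.isSome_iff_exists.mp ((PySem.List.index?_isSome_iff rest a).mpr har)
      obtain ⟨j, hj⟩ : ∃ j, PySem.List.index? rest b = some j :=
        Option.isSome_iff_exists.mp ((PySem.List.index?_isSome_iff rest b).mpr hbr)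
      rw [PySem.List.index?_cons_of_ne rest (Ne.symm hax),
          PySem.List.index?_cons_of_ne rest (Ne.symm hbx), hi, hj]
      rw [hi, hj] at hab
      simpa using hab

-- ===== VERDICT (by name: the statement is the Claim_ definition above) =====
theorem arr_to_map_spec : Claim_equal_arr_to_map := by
  intro arr _
  unfold Spec_arr_to_map arr_to_map arr_to_map_alt
  -- B's backward fold, rewritten as plain inserts of the reversed (value, index) pairs
  have hfold : (PySem.List.enumerate arr.reverse 0).foldl
        (fun d p => d.insert p.2 ((arr.length : Int) - 1 - p.1))
        (PySem.Dict.empty : PySem.Dict Int Int)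
      = (((PySem.List.enumerate arr 0).map (fun p => (p.2, p.1))).reverse).foldl
        (fun d p => d.insert p.1 p.2) (PySem.Dict.empty : PySem.Dict Int Int) := by
    rw [← bwd_pairs_eq arr, List.foldl_map]
  set E := (PySem.List.enumerate arr 0).map (fun p => (p.2, p.1)) with hE
  set first := (E.reverse).foldl (fun d p => d.insert p.1 p.2)
      (PySem.Dict.empty : PySem.Dict Int Int) with hfirst
  -- lookups in 'first' are first-occurrence indices
  have hget : ∀ k : Int, first.get? k
      = (PySem.List.index? arr k).map (fun (i : Nat) => (i : Int)) := by
    intro k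
    rw [hfirst, get?_foldl_insert, List.reverse_reverse, hE, find?_enum arr k 0,
      Option.map_map]
    simp [PySem.Dict.get?_empty]
    rfl
  -- the keys of 'first' are the distinct elements (in last-to-first order)
  have hkeys : first.keys = PySem.Set.ofList arr.reverse := by
    rw [hfirst, PySem.Dict.keys_foldl_insert_key E.reverse Prod.fst (fun d p => p.2) _]
    rw [PySem.Dict.keys_empty, PySem.Set.update_nil_left]
    congr 1
    simp only [List.map_reverse]
    congr 1
    rw [hE, List.map_map]
    exact PySem.List.map_snd_enumerate arr 0
  -- sorting the distinct elements by first index restores first-occurrence order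
  have horder : PySem.List.sorted first.keys (fun v => (first.get? v).getD 0) false
      = PySem.Set.ofList arr := by
    apply PySem.List.sorted_eq_of_perm_of_pairwise_lt
    · rw [hkeys]
      refine (List.perm_ext_iff_of_nodup (PySem.Set.nodup_ofList arr)
        (PySem.Set.nodup_ofList arr.reverse)).mpr ?_
      intro a
      rw [PySem.Set.mem_ofList, PySem.Set.mem_ofList, List.mem_reverse]
    · refine List.Pairwise.imp_of_mem ?_ (ofList_pairwise_fidx arr)
      intro a b ha hb hab
      have har : a ∈ arr := (PySem.Set.mem_ofList arr a).mp ha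
      have hbr : b ∈ arr := (PySem.Set.mem_ofList arr b).mp hb
      obtain ⟨i, hi⟩ : ∃ i, PySem.List.index? arr a = some i :=
        Option.isSome_iff_exists.mp ((PySem.List.index?_isSome_iff arr a).mpr har)
      obtain ⟨j, hj⟩ : ∃ j, PySem.List.index? arr b = some j :=
        Option.isSome_iff_exists.mp ((PySem.List.index?_isSome_iff arr b).mpr hbr)
      rw [hi, hj] at hab
      simp only [hget, hi, hj, Option.map_some, Option.getD_some]
      exact_mod_cast (by simpa using hab : i < j)
  -- A's loop produces exactly the distinct elements with consecutive ranks
  have hA := arr_to_map_fold arr (PySem.Dict.empty : PySem.Dict Int Int)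
  rw [(by simp [PySem.Dict.size_empty] :
    (((PySem.Dict.empty : PySem.Dict Int Int).size : Int)) = 0)] at hA
  rw [hA]
  simp only [hfold, horder]
  simp [PySem.Dict.empty, List.filter_true]
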